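-- pv_equiv track=rewrite | github.com/orwiad10/walter | app/pairing.py | _round_robin_pairs
-- ===== SOURCE A (Python) =====
-- def _round_robin_pairs(order_ids, round_index):
--     players = list(order_ids)
--     if not players:
--         return []
--     if len(players) % 2 == 1:
--         players.append(None)
--     total = len(players)
--     working = players
--     for _ in range(round_index % (total - 1 if total > 1 else 1)):
--         working = [working[0]] + [working[-1]] + working[1:-1]
--     pairs = []
--     half = total // 2
--     for i in range(half):
--         a = working[i]
--         b = working[-1 - i]
--         pairs.append((a, b))
--     return pairs
-- ===== SOURCE B (Python) =====
-- def _round_robin_pairs(order_ids, round_index):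
--     padded = list(order_ids)
--     if not padded:
--         return []
--     if len(padded) % 2 == 1:
--         padded.append(None)
--     total = len(padded)
--     m = total - 1
--     r = round_index % m
--
--     def slot(j):
--         return padded[0] if j == 0 else padded[1 + (j - 1 - r) % m]
--
--     return [(slot(i), slot(total - 1 - i)) for i in range(total // 2)]
-- ===== Notes on version B (the rewrite author's own statement) =====
-- stated objective: faster
-- what changed: B replaces A's repeated list-rebuilding rotation loop (round_index%(n-1) passes over the list) by direct modular index arithmetic computing each pairing slot in O(1), one pass over the pairs.
import Mathlib
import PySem

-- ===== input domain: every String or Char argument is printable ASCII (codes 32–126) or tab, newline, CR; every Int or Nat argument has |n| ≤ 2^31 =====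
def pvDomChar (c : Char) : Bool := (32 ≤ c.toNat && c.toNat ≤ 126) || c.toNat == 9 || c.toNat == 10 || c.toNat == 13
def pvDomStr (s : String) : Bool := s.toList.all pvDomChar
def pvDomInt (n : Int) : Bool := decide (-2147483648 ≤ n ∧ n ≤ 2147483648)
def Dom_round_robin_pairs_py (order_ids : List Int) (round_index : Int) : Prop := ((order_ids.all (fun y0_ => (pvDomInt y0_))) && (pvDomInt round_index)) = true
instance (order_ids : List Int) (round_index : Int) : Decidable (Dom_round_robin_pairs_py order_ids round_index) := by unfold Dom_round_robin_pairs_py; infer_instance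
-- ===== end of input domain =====

-- B replaces A's repeated list-rebuilding rotation loop by direct modular index
-- arithmetic (objective: faster).

-- ===== PORT A =====
-- one rotation step: working = [working[0]] + [working[-1]] + working[1:-1]
-- (working is never empty where this is applied, so pyGetD's default is never used)
def rrRotA (w : List (Option Int)) : List (Option Int) :=
  [PySem.List.pyGetD w 0 none] ++ [PySem.List.pyGetD w (-1) none]
    ++ PySem.List.slice w (some 1) (some (-1))

def round_robin_pairs_py (order_ids : List Int) (round_index : Int) : List (Option Int × Option Int) :=
  let players : List (Option Int) := order_ids.map some
  if players = [] then []
  else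
    let players := if players.length % 2 == 1 then players ++ [none] else players
    let total : Int := players.length
    let working := (PySem.List.pyRange 0
        (PySem.Int.mod round_index (if total > 1 then total - 1 else 1)) 1).foldl
      (fun w _ => rrRotA w) players
    let half := PySem.Int.floordiv total 2
    (PySem.List.pyRange 0 half 1).foldl
      (fun pairs i =>
        pairs ++ [(PySem.List.pyGetD working i none, PySem.List.pyGetD working (-1 - i) none)])
      []

-- ===== PORT B =====
def round_robin_pairs_py_alt (order_ids : List Int) (round_index : Int) : List (Option Int × Option Int) :=
  let padded : List (Option Int) := order_ids.map some
  if padded = [] then []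
  else
    let padded := if padded.length % 2 == 1 then padded ++ [none] else padded
    let total : Int := padded.length
    let m := total - 1
    let r := PySem.Int.mod round_index m
    let slot : Int → Option Int := fun j =>
      if j = 0 then PySem.List.pyGetD padded 0 none
      else PySem.List.pyGetD padded (1 + PySem.Int.mod (j - 1 - r) m) none
    (PySem.List.pyRange 0 (PySem.Int.floordiv total 2) 1).map
      (fun i => (slot i, slot (total - 1 - i)))

-- ===== PRECONDITION & SPEC =====
def Spec_round_robin_pairs_py (order_ids : List Int) (round_index : Int) (out : List (Option Int × Option Int)) : Prop := out = round_robin_pairs_py_alt order_ids round_index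
instance (order_ids : List Int) (round_index : Int) (out : List (Option Int × Option Int)) : Decidable (Spec_round_robin_pairs_py order_ids round_index out) := by unfold Spec_round_robin_pairs_py; infer_instance

-- ===== CLAIM (what is proved, stated in full; the proofs are below) =====
def Claim_equal_round_robin_pairs_py : Prop := ∀ (order_ids : List Int) (round_index : Int), Dom_round_robin_pairs_py order_ids round_index → Spec_round_robin_pairs_py order_ids round_index (round_robin_pairs_py order_ids round_index)

-- ===== LEMMAS AND PROOFS =====

theorem foldl_ignore_iterate {α β : Type} (f : α → α) (l : List β) (a : α) :
    l.foldl (fun x _ => f x) a = f^[l.length] a := by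
  induction l generalizing a with
  | nil => rfl
  | cons x xs ih => simpa [Function.iterate_succ_apply] using ih (f a)

theorem clampIdx_one {n : Nat} (hn : 2 ≤ n) : PySem.List.clampIdx n 1 = 1 := by
  unfold PySem.List.clampIdx
  rw [if_neg (by norm_num)]
  simp
  omega

theorem clampIdx_negone {n : Nat} (hn : 2 ≤ n) : PySem.List.clampIdx n (-1) = n - 1 := by
  unfold PySem.List.clampIdx
  rw [if_pos (by norm_num), if_neg (by omega)]
  omega

theorem slice_one_negone {α : Type} (w : List α) (hw : 2 ≤ w.length) :
    PySem.List.slice w (some 1) (some (-1)) = (w.drop 1).take (w.length - 2) := by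
  simp only [PySem.List.slice, clampIdx_one hw, clampIdx_negone hw]
  congr 1

theorem rrRotA_eq (w : List (Option Int)) (hw : 2 ≤ w.length) :
    rrRotA w = w[0]'(by omega) :: w[w.length - 1]'(by omega)
      :: (w.drop 1).take (w.length - 2) := by
  have hne : w ≠ [] := by intro h; simp [h] at hw
  unfold rrRotA
  rw [PySem.List.pyGetD_eq_getElem w none (by omega) (by omega),
      PySem.List.pyGetD_neg_one w none hne, slice_one_negone w hw]
  simp [List.getLast_eq_getElem]

theorem rrRotA_length (w : List (Option Int)) (hw : 2 ≤ w.length) :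
    (rrRotA w).length = w.length := by
  rw [rrRotA_eq w hw]
  simp
  omega

theorem rrRotA_getElem? (w : List (Option Int)) (hw : 2 ≤ w.length) (j : Nat) (_ : j < w.length) :
    (rrRotA w)[j]? = if j = 0 then w[0]? else if j = 1 then w[w.length - 1]? else w[j - 1]? := by
  rw [rrRotA_eq w hw]
  rcases j with _ | _ | j
  · simp [List.getElem?_eq_getElem (by omega : 0 < w.length)]
  · simp [List.getElem?_eq_getElem (by omega : w.length - 1 < w.length)]
  · simp only [List.getElem?_cons_succ]
    rw [List.getElem?_take_of_lt (by omega), List.getElem?_drop]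
    simp only [if_neg (by omega : ¬ j + 2 = 0), if_neg (by omega : ¬ j + 2 = 1)]
    congr 1
    omega

-- position j of the k-times rotated list, as an index into the original list
def rrIdxI (t k : Nat) (j : Int) : Int :=
  if j = 0 then 0 else 1 + ((j - 1 - (k : Int)) % ((t : Int) - 1))

theorem iterate_length (p : List (Option Int)) (hp : 2 ≤ p.length) (k : Nat) :
    (rrRotA^[k] p).length = p.length := by
  induction k with
  | zero => rfl
  | succ k ih =>
      rw [Function.iterate_succ_apply', rrRotA_length _ (by omega), ih]

theorem emod_add_m (m a : Int) : (a + m) % m = a % m := by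
  simpa using Int.add_mul_emod_self_left (a := a) (b := m) (c := 1)

theorem iterate_getElem? (p : List (Option Int)) (hp : 2 ≤ p.length) (k : Nat) :
    ∀ j : Nat, j < p.length → (rrRotA^[k] p)[j]? = p[(rrIdxI p.length k j).toNat]? := by
  induction k with
  | zero =>
      intro j hj
      rw [Function.iterate_zero_apply]
      unfold rrIdxI
      split
      · next h =>
          have hj0 : j = 0 := by omega
          subst hj0
          simp
      · next h =>
          rw [Int.emod_eq_of_lt (by omega) (by omega)]
          congr 1
          omega
  | succ k ih =>
      intro j hj
      have hlen := iterate_length p hp k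
      rw [Function.iterate_succ_apply', rrRotA_getElem? _ (by omega) j (by omega), hlen]
      by_cases h0 : j = 0
      · rw [if_pos h0, ih 0 (by omega)]
        subst h0
        simp [rrIdxI]
      · rw [if_neg h0]
        by_cases h1 : j = 1
        · rw [if_pos h1, ih (p.length - 1) (by omega)]
          subst h1
          have hcast : ((p.length - 1 : Nat) : Int) = (p.length : Int) - 1 := by omega
          rw [hcast]
          have harg : rrIdxI p.length k ((p.length : Int) - 1)
              = rrIdxI p.length (k + 1) ((1 : Nat) : Int) := by
            unfold rrIdxI
            rw [if_neg (by omega), if_neg (by norm_num)]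
            have hc : ((p.length : Int) - 1) - 1 - (k : Int)
                = (((1 : Nat) : Int) - 1 - ((k + 1 : Nat) : Int)) + ((p.length : Int) - 1) := by
              push_cast; ring
            rw [hc, emod_add_m]
          rw [harg]
        · rw [if_neg h1, ih (j - 1) (by omega)]
          have hcast : ((j - 1 : Nat) : Int) = (j : Int) - 1 := by omega
          rw [hcast]
          have harg : rrIdxI p.length k ((j : Int) - 1) = rrIdxI p.length (k + 1) (j : Int) := by
            unfold rrIdxI
            rw [if_neg (by omega), if_neg (by omega)]
            have hc : ((j : Int) - 1) - 1 - (k : Int) = (j : Int) - 1 - ((k + 1 : Nat) : Int) := by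
              push_cast; ring
            rw [hc]
          rw [harg]

-- the central equivalence, stated on the padded list directly
theorem rr_core (p : List (Option Int)) (ht : 2 ≤ p.length) (ri : Int) :
    (PySem.List.pyRange 0 (PySem.Int.floordiv (p.length : Int) 2) 1).foldl
      (fun pairs i =>
        pairs ++ [(PySem.List.pyGetD ((PySem.List.pyRange 0
            (PySem.Int.mod ri (if (p.length : Int) > 1 then (p.length : Int) - 1 else 1)) 1).foldl
            (fun w _ => rrRotA w) p) i none,
          PySem.List.pyGetD ((PySem.List.pyRange 0
            (PySem.Int.mod ri (if (p.length : Int) > 1 then (p.length : Int) - 1 else 1)) 1).foldl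
            (fun w _ => rrRotA w) p) (-1 - i) none)]) []
    = (PySem.List.pyRange 0 (PySem.Int.floordiv (p.length : Int) 2) 1).map
      (fun i =>
        ((if i = 0 then PySem.List.pyGetD p 0 none
          else PySem.List.pyGetD p
            (1 + PySem.Int.mod (i - 1 - PySem.Int.mod ri ((p.length : Int) - 1)) ((p.length : Int) - 1)) none),
         (if (p.length : Int) - 1 - i = 0 then PySem.List.pyGetD p 0 none
          else PySem.List.pyGetD p
            (1 + PySem.Int.mod ((p.length : Int) - 1 - i - 1 - PySem.Int.mod ri ((p.length : Int) - 1))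
              ((p.length : Int) - 1)) none))) := by
  have hifm : (if (p.length : Int) > 1 then (p.length : Int) - 1 else 1) = (p.length : Int) - 1 := by
    rw [if_pos (by omega)]
  rw [hifm]
  set t := p.length with hT
  have hm : (0 : Int) < (t : Int) - 1 := by omega
  set r := PySem.Int.mod ri ((t : Int) - 1) with hR
  have hr0 : 0 ≤ r := PySem.Int.mod_nonneg ri hm
  have hr1 : r < (t : Int) - 1 := PySem.Int.mod_lt ri hm
  set W := (PySem.List.pyRange 0 r 1).foldl (fun w _ => rrRotA w) p with hW
  have hWit : W = rrRotA^[r.toNat] p := by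
    rw [hW, foldl_ignore_iterate, PySem.List.length_pyRange_one]
    norm_num
  have hWlen : W.length = t := by rw [hWit]; exact iterate_length p ht r.toNat
  have hgetD : ∀ (xs : List (Option Int)) (idx : Int), 0 ≤ idx →
      PySem.List.pyGetD xs idx none = (xs[idx.toNat]?).getD none := by
    intro xs idx h
    unfold PySem.List.pyGetD
    rw [PySem.List.pyGet?_of_nonneg xs h]
  rw [PySem.List.foldl_append_singleton_eq_map
    (f := fun i => (PySem.List.pyGetD W i none, PySem.List.pyGetD W (-1 - i) none))]
  rw [List.nil_append]
  apply List.map_congr_left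
  intro i hi
  rw [PySem.List.mem_pyRange_one] at hi
  obtain ⟨hi0, hi1⟩ := hi
  rw [PySem.Int.floordiv_eq_ediv_of_pos (by norm_num)] at hi1
  have hWval : ∀ j : Nat, j < t → W[j]? = p[(rrIdxI t r.toNat j).toNat]? := by
    intro j hj
    rw [hWit]
    exact iterate_getElem? p ht r.toNat j hj
  have hci : ((i.toNat : Nat) : Int) = i := by omega
  have hcr : ((r.toNat : Nat) : Int) = r := by omega
  have hfst : PySem.List.pyGetD W i none
      = (if i = 0 then PySem.List.pyGetD p 0 none
         else PySem.List.pyGetD p (1 + PySem.Int.mod (i - 1 - r) ((t : Int) - 1)) none) := by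
    rw [hgetD W i hi0, hWval i.toNat (by omega), hci]
    by_cases h0 : i = 0
    · rw [if_pos h0, h0, hgetD p 0 (by norm_num)]
      simp [rrIdxI]
    · rw [if_neg h0]
      have hmod0 := Int.emod_nonneg (i - 1 - r) (by omega : ((t : Int) - 1) ≠ 0)
      have hmod1 := Int.emod_lt_of_pos (i - 1 - r) hm
      rw [hgetD p (1 + PySem.Int.mod (i - 1 - r) ((t : Int) - 1))
        (by rw [PySem.Int.mod_eq_emod_of_pos hm]; omega)]
      have hidx : rrIdxI t r.toNat i = 1 + PySem.Int.mod (i - 1 - r) ((t : Int) - 1) := by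
        unfold rrIdxI
        rw [if_neg h0, PySem.Int.mod_eq_emod_of_pos hm, hcr]
      rw [hidx]
  have hsnd : PySem.List.pyGetD W (-1 - i) none
      = (if (t : Int) - 1 - i = 0 then PySem.List.pyGetD p 0 none
         else PySem.List.pyGetD p
           (1 + PySem.Int.mod ((t : Int) - 1 - i - 1 - r) ((t : Int) - 1)) none) := by
    have hneg : (-1 - i : Int) = -((i.toNat + 1 : Nat) : Int) := by push_cast; omega
    rw [show PySem.List.pyGetD W (-1 - i) none = (W[W.length - (i.toNat + 1)]?).getD none by
      unfold PySem.List.pyGetD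
      rw [hneg, PySem.List.pyGet?_neg_natCast W (i.toNat + 1) (by omega) (by omega)]]
    rw [hWlen, hWval (t - (i.toNat + 1)) (by omega)]
    rw [if_neg (by omega)]
    have hmod0 := Int.emod_nonneg ((t : Int) - 1 - i - 1 - r) (by omega : ((t : Int) - 1) ≠ 0)
    have hmod1 := Int.emod_lt_of_pos ((t : Int) - 1 - i - 1 - r) hm
    rw [hgetD p (1 + PySem.Int.mod ((t : Int) - 1 - i - 1 - r) ((t : Int) - 1))
      (by rw [PySem.Int.mod_eq_emod_of_pos hm]; omega)]
    have hidx : rrIdxI t r.toNat ((t - (i.toNat + 1) : Nat) : Int)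
        = 1 + PySem.Int.mod ((t : Int) - 1 - i - 1 - r) ((t : Int) - 1) := by
      unfold rrIdxI
      rw [if_neg (by omega), PySem.Int.mod_eq_emod_of_pos hm]
      have harg : ((t - (i.toNat + 1) : Nat) : Int) - 1 - ((r.toNat : Nat) : Int)
          = (t : Int) - 1 - i - 1 - r := by omega
      rw [harg]
    rw [hidx]
  rw [hfst, hsnd]

-- ===== VERDICT (by name: the statement is the Claim_ definition above) =====
theorem round_robin_pairs_py_spec : Claim_equal_round_robin_pairs_py := by
  intro order_ids round_index _
  unfold Spec_round_robin_pairs_py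
  by_cases h0 : order_ids.map some = []
  · simp only [round_robin_pairs_py, round_robin_pairs_py_alt]
    rw [if_pos h0, if_pos h0]
  · have hlen : 0 < order_ids.length := by
      cases order_ids with
      | nil => exact absurd rfl h0
      | cons a l => simp
    have ht : 2 ≤ (if (order_ids.map some).length % 2 == 1
        then order_ids.map some ++ [none] else order_ids.map some).length := by
      split
      · next h => simp only [List.length_append, List.length_map, List.length_cons,
          List.length_nil]; omega
      · next h =>
          simp only [beq_iff_eq, List.length_map] at h ⊢
          omega
    have hcore := rr_core _ ht round_index
    simp only [round_robin_pairs_py, round_robin_pairs_py_alt]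
    rw [if_neg h0, if_neg h0]
    exact hcore
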